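-- pv_equiv track=rewrite | github.com/Chaerim1001/programmers | Lv.1/햄버거_만들기.py | solution
-- ===== SOURCE A (Python) =====
-- def solution(ingredient):
--     value = []
--     result = 0
--     for i in ingredient:
--         value.append(i)
--         if value[-4:] == [1, 2, 3, 1]:
--             result += 1
--             for i in range(4):
--                 value.pop()
--     return result
-- ===== SOURCE B (Python) =====
-- def _remove_first(value):
--     """Return a new list with the leftmost contiguous [1,2,3,1] removed, or None."""
--     n = len(value)
--     i = 0
--     while i + 4 <= n:
--         if value[i:i + 4] == [1, 2, 3, 1]:
--             return value[:i] + value[i + 4:]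
--         i += 1
--     return None
--
--
-- def solution(ingredient):
--     # Repeatedly delete the leftmost [1,2,3,1] burger until none remains.
--     value = list(ingredient)
--     result = 0
--     while True:
--         found = _remove_first(value)
--         if found is None:
--             return result
--         value = found
--         result += 1
-- ===== Notes on version B (the rewrite author's own statement) =====
-- stated objective: alternative
-- what changed: Replaces A's single left-to-right stack pass (append, check the last four, pop four) with repeated scan-and-remove passes that delete the leftmost contiguous burger pattern 1-2-3-1 from a copy of the list until none remains; equal because A's stack removals are exactly the leftmost-occurrence reduction steps.
import Mathlib
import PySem

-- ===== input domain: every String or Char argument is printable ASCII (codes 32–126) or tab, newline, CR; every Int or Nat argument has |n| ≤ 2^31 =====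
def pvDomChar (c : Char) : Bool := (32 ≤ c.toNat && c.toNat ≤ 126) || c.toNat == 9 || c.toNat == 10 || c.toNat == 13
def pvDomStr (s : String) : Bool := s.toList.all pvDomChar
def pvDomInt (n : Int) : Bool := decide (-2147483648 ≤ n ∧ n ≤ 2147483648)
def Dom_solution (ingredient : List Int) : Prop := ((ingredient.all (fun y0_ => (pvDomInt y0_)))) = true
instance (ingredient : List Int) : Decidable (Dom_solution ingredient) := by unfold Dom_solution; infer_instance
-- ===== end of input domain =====

-- B replaces A's single stack pass with repeated leftmost scan-and-remove passes (alternative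
-- decomposition, not claimed faster); equivalence of the return values is proved below.

-- ===== PORT A =====
-- one iteration of A's for-loop body over the state (value, result)
def stepA (st : List Int × Int) (i : Int) : List Int × Int :=
  let value := st.1 ++ [i]
  if PySem.List.slice value (some (-4)) none = [1, 2, 3, 1] then
    -- result += 1; for i in range(4): value.pop()
    ((PySem.List.pyRange 0 4 1).foldl
        (fun v _ => match PySem.List.pop? v (-1) with
                    | some p => p.2
                    | none => v) value,
     st.2 + 1)
  else (value, st.2)

def solution (ingredient : List Int) : Int :=
  (ingredient.foldl stepA ([], 0)).2

-- ===== PORT B =====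
-- the while-loop of _remove_first: scan i = 0,1,… while i+4 ≤ n for the leftmost [1,2,3,1]
def rfLoop (value : List Int) (n i : Nat) : Option (List Int) :=
  if _h : i + 4 ≤ n then
    if PySem.List.slice value (some (i : Int)) (some ((i : Int) + (4 : Nat))) = [1, 2, 3, 1] then
      some (PySem.List.slice value none (some (i : Int)) ++
            PySem.List.slice value (some ((i : Int) + (4 : Nat))) none)
    else rfLoop value n (i + 1)
  else none
termination_by n - i

-- _remove_first(value)
def removeFirst (value : List Int) : Option (List Int) :=
  rfLoop value value.length 0

-- termination of B's outer while-loop: each removal shortens the list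
theorem rfLoop_some_length {value : List Int} {n i : Nat} {w : List Int}
    (hn : n = value.length) (h : rfLoop value n i = some w) : w.length < value.length := by
  fun_induction rfLoop value n i with
  | case1 i hle hsl =>
    simp only [Option.some.injEq] at h
    subst h hn
    rw [PySem.List.slice_to_natCast] at *
    rw [show ((i : Int) + ((4 : Nat) : Int)) = (((i + 4 : Nat) : Nat) : Int) by push_cast; ring,
        PySem.List.slice_from_natCast]
    simp only [List.length_append, List.length_take, List.length_drop]
    omega
  | case2 i hle hsl ih => exact ih h
  | case3 i hle => simp at h

-- B's outer while-loop over (value, result)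
def countLoop (value : List Int) : Int :=
  match h : removeFirst value with
  | none => 0
  | some w => 1 + countLoop w
termination_by value.length
decreasing_by exact rfLoop_some_length rfl h

def solution_alt (ingredient : List Int) : Int :=
  countLoop ingredient

-- ===== PRECONDITION & SPEC =====
def Spec_solution (ingredient : List Int) (out : Int) : Prop := out = solution_alt ingredient
instance (ingredient : List Int) (out : Int) : Decidable (Spec_solution ingredient out) := by unfold Spec_solution; infer_instance

-- ===== CLAIM (what is proved, stated in full; the proofs are below) =====
def Claim_equal_solution : Prop := ∀ (ingredient : List Int), Dom_solution ingredient → Spec_solution ingredient (solution ingredient)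

-- ===== LEMMAS AND PROOFS =====

-- structural characterisation of _remove_first (proof-side only)
def remF : List Int → Option (List Int)
  | [] => none
  | x :: t =>
    if List.take 4 (x :: t) = [1, 2, 3, 1] then some (List.drop 4 (x :: t))
    else (remF t).map (x :: ·)

theorem remF_short : ∀ {v : List Int}, v.length < 4 → remF v = none := by
  intro v
  induction v with
  | nil => intro _; rfl
  | cons a t ih =>
    intro h
    have h1 : List.take 4 (a :: t) ≠ [1, 2, 3, 1] := by
      intro he
      have h2 := congrArg List.length he
      simp at h h2
      omega
    simp only [remF, if_neg h1]
    rw [ih (by simp at h ⊢; omega)]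
    rfl

theorem remF_cons_none {a : Int} {t : List Int} (h : remF (a :: t) = none) :
    List.take 4 (a :: t) ≠ [1, 2, 3, 1] ∧ remF t = none := by
  by_cases hc : List.take 4 (a :: t) = [1, 2, 3, 1]
  · simp [remF, hc] at h
  · refine ⟨hc, ?_⟩
    simp only [remF, if_neg hc, Option.map_eq_none_iff] at h
    exact h

theorem remF_prefix : ∀ {u w : List Int}, remF (u ++ w) = none → remF u = none := by
  intro u
  induction u with
  | nil => intro w _; rfl
  | cons a u' ih =>
    intro w h
    rw [List.cons_append] at h
    obtain ⟨hc, hr⟩ := remF_cons_none h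
    by_cases hl : 4 ≤ (a :: u').length
    · have hc' : List.take 4 (a :: u') ≠ [1, 2, 3, 1] := by
        intro he
        apply hc
        rw [show a :: (u' ++ w) = (a :: u') ++ w from rfl,
            List.take_append_of_le_length hl, he]
      simp only [remF, if_neg hc', ih hr]
      rfl
    · exact remF_short (by omega)

theorem remF_snoc : ∀ {v : List Int} (x : Int), remF v = none →
    List.drop ((v ++ [x]).length - 4) (v ++ [x]) ≠ [1, 2, 3, 1] →
    remF (v ++ [x]) = none := by
  intro v
  induction v with
  | nil => intro x _ _; exact remF_short (by simp)
  | cons a v' ih =>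
    intro x h hd
    obtain ⟨hc, hr⟩ := remF_cons_none h
    by_cases hl : 3 ≤ v'.length
    · have hc' : List.take 4 ((a :: v') ++ [x]) ≠ [1, 2, 3, 1] := by
        rwa [List.take_append_of_le_length (by simp; omega)]
      have hd' : List.drop ((v' ++ [x]).length - 4) (v' ++ [x]) ≠ [1, 2, 3, 1] := by
        intro he
        apply hd
        have : ((a :: v') ++ [x]).length - 4 = ((v' ++ [x]).length - 4) + 1 := by
          simp; omega
        rw [this, List.cons_append, List.drop_succ_cons]
        exact he
      rw [List.cons_append]
      simp only [remF]
      rw [if_neg (by rwa [← List.cons_append]), ih x hr hd']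
      rfl
    · by_cases hl2 : v'.length = 2
      · -- the whole list has length 4: take 4 = drop 0 = the list itself
        have hc' : List.take 4 ((a :: v') ++ [x]) ≠ [1, 2, 3, 1] := by
          rw [List.take_of_length_le (by simp; omega)]
          intro he
          apply hd
          rw [show (a :: v' ++ [x]).length - 4 = 0 by simp; omega, List.drop_zero]
          exact he
        show remF (a :: (v' ++ [x])) = none
        simp only [remF]
        rw [if_neg (by rwa [← List.cons_append]),
            remF_short (v := v' ++ [x]) (by simp; omega)]
        rfl
      · exact remF_short (by simp; omega)

theorem remF_pat_mid : ∀ {t : List Int} (w : List Int), remF (t ++ [1, 2, 3]) = none →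
    remF (t ++ ([1, 2, 3, 1] ++ w)) = some (t ++ w) := by
  intro t
  induction t with
  | nil =>
    intro w _
    rw [List.nil_append, show ([1, 2, 3, 1] : List Int) ++ w = 1 :: (2 :: 3 :: 1 :: w) by simp]
    simp only [remF]
    rw [if_pos (by simp)]
    simp
  | cons a t' ih =>
    intro w h
    rw [List.cons_append] at h
    obtain ⟨hc, hr⟩ := remF_cons_none h
    have hc' : List.take 4 ((a :: t') ++ ([1, 2, 3, 1] ++ w)) ≠ [1, 2, 3, 1] := by
      intro he
      apply hc
      rw [← List.cons_append]
      rw [show (a :: t') ++ ([1, 2, 3, 1] ++ w) = ((a :: t') ++ [1, 2, 3]) ++ ([1] ++ w) by simp,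
          List.take_append_of_le_length (by simp)] at he
      exact he
    rw [List.cons_append]
    simp only [remF]
    rw [if_neg (by rwa [← List.cons_append]), ih w hr]
    rfl

-- the index loop of _remove_first computes the structural remF
theorem rfLoop_eq : ∀ (v u : List Int),
    rfLoop (u ++ v) (u ++ v).length u.length = (remF v).map (u ++ ·) := by
  intro v
  induction v with
  | nil =>
    intro u
    rw [rfLoop]
    simp [remF]
  | cons x v' ih =>
    intro u
    rw [rfLoop]
    by_cases hle : u.length + 4 ≤ (u ++ x :: v').length
    · rw [dif_pos hle]
      have hsl : PySem.List.slice (u ++ x :: v') (some (u.length : Int))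
          (some ((u.length : Int) + ((4 : Nat) : Int))) = List.take 4 (x :: v') := by
        rw [PySem.List.slice_natCast_add, List.drop_append_of_le_length (le_refl _),
            List.drop_length, List.nil_append]
      by_cases hc : List.take 4 (x :: v') = [1, 2, 3, 1]
      · rw [if_pos (by rw [hsl, hc])]
        rw [PySem.List.slice_to_natCast,
            show ((u.length : Int) + ((4 : Nat) : Int)) = ((u.length + 4 : Nat) : Int) by push_cast; ring,
            PySem.List.slice_from_natCast,
            List.take_append_of_le_length (le_refl _), List.take_length]
        simp only [remF, if_pos hc, Option.map_some]
        rw [List.drop_length_add_append]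
      · rw [if_neg (by rw [hsl]; exact hc)]
        have := ih (u ++ [x])
        rw [List.append_assoc, List.singleton_append] at this
        rw [show u.length + 1 = (u ++ [x]).length by simp, this]
        simp only [remF, if_neg hc]
        rw [Option.map_map]
        congr 1
        funext w
        simp
    · rw [dif_neg hle]
      have hlen : (x :: v').length < 4 := by simp at hle ⊢; omega
      rw [remF_short hlen]
      rfl

theorem removeFirst_eq_remF (value : List Int) : removeFirst value = remF value := by
  have := rfLoop_eq value []
  simpa [removeFirst] using this

theorem countLoop_none {value : List Int} (h : remF value = none) : countLoop value = 0 := by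
  have h' : removeFirst value = none := by rw [removeFirst_eq_remF]; exact h
  rw [countLoop]
  split
  · rfl
  · rename_i w hw
    rw [h'] at hw
    cases hw

theorem countLoop_some {value w : List Int} (h : remF value = some w) :
    countLoop value = 1 + countLoop w := by
  have h' : removeFirst value = some w := by rw [removeFirst_eq_remF]; exact h
  rw [countLoop]
  split
  · rename_i hw
    rw [h'] at hw
    cases hw
  · rename_i w' hw
    rw [h'] at hw
    cases hw
    rfl

-- the four pops of A's fire branch remove exactly the matched suffix
theorem pops_concat (t : List Int) (a b c d : Int) :
    (PySem.List.pyRange 0 4 1).foldl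
        (fun v _ => match PySem.List.pop? v (-1) with
                    | some p => p.2
                    | none => v) (t ++ [a, b, c, d]) = t := by
  rw [show PySem.List.pyRange 0 4 1 = [0, 1, 2, 3] by decide]
  simp only [List.foldl]
  rw [show t ++ [a, b, c, d] = (((t ++ [a]) ++ [b]) ++ [c]) ++ [d] by simp,
      PySem.List.pop?_last, PySem.List.pop?_last, PySem.List.pop?_last, PySem.List.pop?_last]

-- main invariant: running A's loop from an irreducible stack counts B's removals on stack ++ rest
theorem mainA : ∀ (rest v : List Int) (c : Int), remF v = none →
    (List.foldl stepA (v, c) rest).2 = c + countLoop (v ++ rest) := by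
  intro rest
  induction rest with
  | nil =>
    intro v c h
    rw [List.foldl_nil, List.append_nil, countLoop_none h]
    ring
  | cons x rest' ih =>
    intro v c h
    rw [List.foldl_cons]
    by_cases hC : PySem.List.slice (v ++ [x]) (some (-4)) none = [1, 2, 3, 1]
    · -- fire branch
      rw [PySem.List.slice_from_neg_ofNat (v ++ [x]) 4 (by omega)] at hC
      have hlen : 4 ≤ (v ++ [x]).length := by
        by_contra hlt
        have := congrArg List.length hC
        simp only [List.length_drop] at this
        simp at this hlt
        omega
      set value := v ++ [x] with hval
      set t := List.take (value.length - 4) value with ht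
      have hsplit : value = t ++ [1, 2, 3, 1] := by
        rw [ht, ← hC, List.take_append_drop]
      have hstep : stepA (v, c) x = (t, c + 1) := by
        simp only [stepA]
        rw [if_pos (by rw [PySem.List.slice_from_neg_ofNat (v ++ [x]) 4 (by omega), ← hval, hC])]
        rw [← hval, hsplit, show ([1, 2, 3, 1] : List Int) = [(1 : Int), 2, 3, 1] from rfl,
            pops_concat]
      have hv31 : v = t ++ [1, 2, 3] ∧ x = 1 := by
        have : v ++ [x] = (t ++ [1, 2, 3]) ++ [1] := by
          rw [← hval, hsplit]; simp
        have h2 := List.append_inj' this (by rfl)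
        exact ⟨h2.1, by simpa using h2.2⟩
      have hremt : remF t = none := by
        apply remF_prefix (w := [1, 2, 3])
        rw [← hv31.1]; exact h
      have hremv3 : remF (t ++ [1, 2, 3]) = none := by rw [← hv31.1]; exact h
      rw [hstep, ih t (c + 1) hremt]
      have : v ++ x :: rest' = t ++ ([1, 2, 3, 1] ++ rest') := by
        rw [show v ++ x :: rest' = (v ++ [x]) ++ rest' by simp, ← hval, hsplit]
        simp
      rw [this, countLoop_some (remF_pat_mid rest' hremv3)]
      ring
    · -- no fire
      have hstep : stepA (v, c) x = (v ++ [x], c) := by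
        simp only [stepA]
        rw [if_neg hC]
      have hrem : remF (v ++ [x]) = none := by
        apply remF_snoc x h
        rw [PySem.List.slice_from_neg_ofNat (v ++ [x]) 4 (by omega)] at hC
        exact hC
      rw [hstep, ih (v ++ [x]) c hrem]
      congr 1
      simp

-- ===== VERDICT (by name: the statement is the Claim_ definition above) =====
theorem solution_spec : Claim_equal_solution := by
  intro ingredient _
  unfold Spec_solution solution solution_alt
  have := mainA ingredient [] 0 (by rfl)
  simpa using this
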